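-- pv_equiv track=rewrite | github.com/sammy0329/DataStructures_Study | sammy/230309_study/프로_152995_인사고과.py | solution
-- ===== SOURCE A (Python) =====
-- def solution(scores):
--     answer = 1
--     wanho_score=scores[0] # 완호의 x,y 점수
--     wanho_score_sum=sum(wanho_score) # 완호 점수 합
--
--     # (x,y)로 가정할 때, x는 내림차순 y는 오름차순으로 정리
--     scores.sort(key=lambda x: (-x[0],x[1]))
--
--     check=0
--
--     for val in scores:
--         # 완호 점수 x,y가 val의 x,y 값 보다 모두 작으면 -1 반환
--         if wanho_score[0]<val[0] and wanho_score[1]<val[1]: return -1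
--
--         if check<=val[1]: # val[1] 값 중 최댓값 찾아감.
--             if sum(val)>wanho_score_sum:
--                 answer+=1
--             check=val[1]
--
--     return answer
-- ===== SOURCE B (Python) =====
-- def solution(scores):
--     # Brute force, no sort: a candidate is out iff someone beats them on both scores.
--     # Note: unlike A, this does not mutate `scores` (A sorts it in place); return value only.
--     wanho = scores[0]
--     ws = sum(wanho)
--
--     def dominated(c):
--         return any(c[0] < f[0] and c[1] < f[1] for f in scores)
--
--     if dominated(wanho):
--         return -1
--     return 1 + sum(1 for e in scores if not dominated(e) and sum(e) > ws)
-- ===== Notes on version B (the rewrite author's own statement) =====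
-- stated objective: simpler
-- what changed: B drops A's in-place sort and running-maximum sweep entirely and instead tests each candidate directly for strict domination with a nested scan, counting the non-dominated candidates with a larger total (return-value equivalence: A sorts its argument in place, B does not mutate it).
-- intended difference: On inputs where Wanho is not dominated but some non-dominated candidate with a negative second score has a strictly larger total, A's running maximum starts at 0 instead of -infinity and silently skips counting those candidates, returning a smaller rank count; B counts them, which is the intended ranking. — e.g. on solution([[-5, -1], [0, -2]]): A returns 1, B returns 2
import Mathlib
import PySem

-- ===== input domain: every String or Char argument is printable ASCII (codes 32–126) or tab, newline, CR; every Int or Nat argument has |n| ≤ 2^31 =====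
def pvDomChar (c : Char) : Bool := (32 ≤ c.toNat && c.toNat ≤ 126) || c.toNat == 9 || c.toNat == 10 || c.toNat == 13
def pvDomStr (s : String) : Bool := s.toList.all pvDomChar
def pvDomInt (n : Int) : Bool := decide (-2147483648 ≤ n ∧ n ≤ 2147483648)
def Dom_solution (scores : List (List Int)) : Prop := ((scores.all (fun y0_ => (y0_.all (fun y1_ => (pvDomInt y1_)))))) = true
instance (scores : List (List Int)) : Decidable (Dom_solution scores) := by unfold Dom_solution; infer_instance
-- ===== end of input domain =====

-- B replaces A's in-place sort + running-maximum sweep by a direct nested domination scan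
-- (simpler; return-value equivalence only: A sorts its argument in place, B does not mutate it).

-- shared shorthand for Python's v[0] / v[1] on an inner list (exact inside Pre_, where 2 ≤ length)
def pvG0 (v : List Int) : Int := PySem.List.pyGetD v 0 0
def pvG1 (v : List Int) : Int := PySem.List.pyGetD v 1 0

-- ===== PORT A =====
-- wanho_score = scores[0]
def pvWanho (scores : List (List Int)) : List Int := PySem.List.pyGetD scores 0 []

-- the 'for val in scores:' loop of A, state = (answer, check); early 'return -1' = value -1
def pvLoopA (wx wy ws : Int) : List (List Int) → Int → Int → Int
  | [], answer, _check => answer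
  | v :: rest, answer, check =>
    if wx < pvG0 v ∧ wy < pvG1 v then -1
    else
      if check ≤ pvG1 v then
        pvLoopA wx wy ws rest (if ws < v.sum then answer + 1 else answer) (pvG1 v)
      else
        pvLoopA wx wy ws rest answer check

def solution (scores : List (List Int)) : Int :=
  let wanho := pvWanho scores
  let ws := wanho.sum
  let sortedScores := PySem.List.sorted2 scores (fun v => -(pvG0 v)) (fun v => pvG1 v)
  pvLoopA (pvG0 wanho) (pvG1 wanho) ws sortedScores 1 0

-- ===== PORT B =====
def pvBeaten (scores : List (List Int)) (c : List Int) : Bool :=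
  scores.any (fun f => decide (pvG0 c < pvG0 f) && decide (pvG1 c < pvG1 f))

def solution_alt (scores : List (List Int)) : Int :=
  let wanho := pvWanho scores
  let ws := wanho.sum
  if pvBeaten scores wanho then -1
  else 1 + ((scores.countP (fun e => !pvBeaten scores e && decide (ws < e.sum))) : Int)

-- ===== PRECONDITION & SPEC =====
-- Pre_ excludes exactly the inputs where Python A raises IndexError: empty scores (scores[0])
-- and inner lists of length < 2 (wanho_score[1] / the sort key x[0] / val[1]).
def Pre_solution (scores : List (List Int)) : Prop :=
  scores ≠ [] ∧ ∀ s ∈ scores, 2 ≤ s.length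
instance (scores : List (List Int)) : Decidable (Pre_solution scores) := by
  unfold Pre_solution; infer_instance
def pvWitness_solution : List (List Int) := [[3, 4], [2, 1]]

-- On inputs where Wanho is not dominated but some non-dominated candidate with a negative second
-- score has a strictly larger total, A's running maximum 'check' starts at 0 instead of -∞ and
-- silently skips counting those candidates, so A returns a smaller count; B counts them, which is
-- the intended ranking.
-- 'e is not strictly dominated in scores' (on both coordinates)
def pvND (scores : List (List Int)) (e : List Int) : Prop :=
  ∀ f ∈ scores, pvG0 f ≤ pvG0 e ∨ pvG1 f ≤ pvG1 e

def D_solution (scores : List (List Int)) : Prop :=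
  pvND scores (pvWanho scores) ∧
  ∃ e ∈ scores, pvG1 e < 0 ∧ pvND scores e ∧ (pvWanho scores).sum < e.sum
instance (scores : List (List Int)) : Decidable (D_solution scores) := by
  unfold D_solution pvND; infer_instance

def Spec_solution (scores : List (List Int)) (out : Int) : Prop :=
  ¬ D_solution scores → out = solution_alt scores
instance (scores : List (List Int)) (out : Int) : Decidable (Spec_solution scores out) := by
  unfold Spec_solution; infer_instance

def pvDiffWitness_solution : List (List Int) := [[-5, -1], [0, -2]]
def pvDiffWitnessOut_solution : Int × Int := (1, 2)

-- ===== CLAIM (what is proved, stated in full; the proofs are below) =====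
def Claim_unchanged_solution : Prop := ∀ (scores : List (List Int)), Dom_solution scores → Pre_solution scores → Spec_solution scores (solution scores)
def Claim_changed_solution : Prop := Dom_solution (pvDiffWitness_solution) ∧ Pre_solution (pvDiffWitness_solution) ∧ D_solution (pvDiffWitness_solution) ∧ solution (pvDiffWitness_solution) = pvDiffWitnessOut_solution.1 ∧ solution_alt (pvDiffWitness_solution) = pvDiffWitnessOut_solution.2 ∧ pvDiffWitnessOut_solution.1 ≠ pvDiffWitnessOut_solution.2
def Claim_exact_solution : Prop := ∀ (scores : List (List Int)), Dom_solution scores → Pre_solution scores → D_solution scores → solution scores ≠ solution_alt scores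

-- ===== LEMMAS AND PROOFS =====

lemma pvD_iff (scores : List (List Int)) :
    D_solution scores ↔
      ((¬ ∃ f ∈ scores, pvG0 (pvWanho scores) < pvG0 f ∧ pvG1 (pvWanho scores) < pvG1 f) ∧
       ∃ e ∈ scores, pvG1 e < 0 ∧ (¬ ∃ f ∈ scores, pvG0 e < pvG0 f ∧ pvG1 e < pvG1 f) ∧
         (pvWanho scores).sum < e.sum) := by
  unfold D_solution pvND
  simp only [not_exists, not_and]
  constructor
  · rintro ⟨h1, e, he, hneg, h2, hs⟩
    refine ⟨fun f hf ha => ?_, e, he, hneg, fun f hf ha => ?_, hs⟩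
    · have := h1 f hf; omega
    · have := h2 f hf; omega
  · rintro ⟨h1, e, he, hneg, h2, hs⟩
    refine ⟨fun f hf => ?_, e, he, hneg, fun f hf => ?_, hs⟩
    · have := h1 f hf; omega
    · have := h2 f hf; omega

-- the sortedness relation produced by A's key (-x[0], x[1]): x descending, ties y ascending
def pvPR (a b : List Int) : Prop := pvG0 b < pvG0 a ∨ (pvG0 a = pvG0 b ∧ pvG1 a ≤ pvG1 b)

def pvBefore (a b : List Int) : Bool :=
  decide (-(pvG0 a) < -(pvG0 b)) || (!decide (-(pvG0 b) < -(pvG0 a)) && decide (pvG1 a < pvG1 b))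

lemma pvSorted2_eq (xs : List (List Int)) :
    PySem.List.sorted2 xs (fun v => -(pvG0 v)) (fun v => pvG1 v) =
      xs.foldl (fun acc x => PySem.List.insertBy pvBefore x acc) [] := rfl

lemma pvBefore_true (a b : List Int) (h : pvBefore a b = true) : pvPR a b := by
  simp [pvBefore, pvPR] at *; omega

lemma pvBefore_false (a b : List Int) (h : pvBefore a b = false) : pvPR b a := by
  simp [pvBefore, pvPR] at *; omega

lemma pvPR_trans (a b c : List Int) (h1 : pvPR a b) (h2 : pvPR b c) : pvPR a c := by
  simp [pvPR] at *; omega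

lemma pvInsertBy_pairwise (l : List (List Int)) (hp : l.Pairwise pvPR) (x : List Int) :
    (PySem.List.insertBy pvBefore x l).Pairwise pvPR := by
  induction l with
  | nil => simp [PySem.List.insertBy]
  | cons y ys ih =>
    rcases List.pairwise_cons.mp hp with ⟨hy, hys⟩
    by_cases hb : pvBefore x y = true
    · simp only [PySem.List.insertBy, hb, if_true]
      refine List.pairwise_cons.mpr ⟨?_, hp⟩
      intro z hz
      rcases List.mem_cons.mp hz with rfl | hz
      · exact pvBefore_true x z hb
      · exact pvPR_trans x y z (pvBefore_true x y hb) (hy z hz)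
    · simp only [PySem.List.insertBy, hb, if_false]
      refine List.pairwise_cons.mpr ⟨?_, ih hys⟩
      intro z hz
      rcases (PySem.List.mem_insertBy pvBefore x z ys).mp hz with rfl | hz
      · exact pvBefore_false z y (by simpa using hb)
      · exact hy z hz

lemma pvSorted2_pairwise (xs : List (List Int)) :
    (PySem.List.sorted2 xs (fun v => -(pvG0 v)) (fun v => pvG1 v)).Pairwise pvPR := by
  rw [pvSorted2_eq]
  have : ∀ (l acc : List (List Int)), acc.Pairwise pvPR →
      (l.foldl (fun acc x => PySem.List.insertBy pvBefore x acc) acc).Pairwise pvPR := by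
    intro l
    induction l with
    | nil => intro acc h; simpa using h
    | cons x t ih => intro acc h; exact ih _ (pvInsertBy_pairwise acc h x)
  exact this xs [] (by simp)

lemma pvFoldl_max_le_iff (l : List Int) (a t : Int) :
    l.foldl max a ≤ t ↔ a ≤ t ∧ ∀ x ∈ l, x ≤ t := by
  induction l generalizing a with
  | nil => simp
  | cons x xs ih =>
    simp only [List.foldl_cons, ih, List.mem_cons]
    constructor
    · rintro ⟨h1, h2⟩
      exact ⟨le_trans (le_max_left _ _) h1,
             fun y hy => hy.elim (fun e => e ▸ le_trans (le_max_right _ _) h1) (h2 y)⟩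
    · rintro ⟨h1, h2⟩
      exact ⟨max_le h1 (h2 x (Or.inl rfl)), fun y hy => h2 y (Or.inr hy)⟩

-- the per-element predicate that A's sweep counts (over the full list L)
def pvA (L : List (List Int)) (ws : Int) (e : List Int) : Bool :=
  decide (0 ≤ pvG1 e) &&
    !(L.any (fun f => decide (pvG0 e < pvG0 f) && decide (pvG1 e < pvG1 f))) &&
    decide (ws < e.sum)

lemma pvLoop_neg (wx wy ws : Int) (l : List (List Int)) :
    ∀ (ans c : Int), (∃ v ∈ l, wx < pvG0 v ∧ wy < pvG1 v) →
      pvLoopA wx wy ws l ans c = -1 := by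
  induction l with
  | nil => intro ans c h; simp at h
  | cons v rest ih =>
    intro ans c h
    by_cases hv : wx < pvG0 v ∧ wy < pvG1 v
    · simp [pvLoopA, hv]
    · have h' : ∃ w ∈ rest, wx < pvG0 w ∧ wy < pvG1 w := by
        rcases h with ⟨w, hw, hd⟩
        rcases List.mem_cons.mp hw with rfl | hw
        · exact absurd hd hv
        · exact ⟨w, hw, hd⟩
      by_cases hc : c ≤ pvG1 v <;> simp [pvLoopA, hv, hc, ih _ _ h']

lemma pvSweep (wx wy ws : Int) (L : List (List Int))
    (hsort : L.Pairwise pvPR)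
    (hw : ∀ f ∈ L, ¬(wx < pvG0 f ∧ wy < pvG1 f)) :
    ∀ (l P : List (List Int)) (ans c : Int),
      L = P ++ l → c = (P.map pvG1).foldl max 0 →
      pvLoopA wx wy ws l ans c = ans + ((l.countP (pvA L ws)) : Int) := by
  intro l
  induction l with
  | nil => intro P ans c _ _; simp [pvLoopA]
  | cons v rest ih =>
    intro P ans c hL hc
    have hvL : v ∈ L := by rw [hL]; simp
    have hnv : ¬(wx < pvG0 v ∧ wy < pvG1 v) := hw v hvL
    have hsplit := (List.pairwise_append.mp (hL ▸ hsort))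
    have hPv : ∀ f ∈ P, pvPR f v := fun f hf => hsplit.2.2 f hf v (by simp)
    have hvRest : ∀ f ∈ rest, pvPR v f :=
      (List.pairwise_cons.mp hsplit.2.1).1
    -- the sweep test "check ≤ v[1]" is exactly "v[1] ≥ 0 and v is not dominated in L"
    have hkey : (c ≤ pvG1 v) ↔ (0 ≤ pvG1 v ∧
        (L.any (fun f => decide (pvG0 v < pvG0 f) && decide (pvG1 v < pvG1 f))) = false) := by
      rw [hc, pvFoldl_max_le_iff]
      simp only [List.mem_map, List.any_eq_false, Bool.and_eq_true, decide_eq_true_eq, not_and]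
      constructor
      · rintro ⟨h0, hP⟩
        refine ⟨h0, ?_⟩
        intro f hf h1 h2
        rw [hL] at hf
        rcases List.mem_append.mp hf with hf | hf
        · exact absurd h2 (not_lt.mpr (hP _ ⟨f, hf, rfl⟩))
        · rcases List.mem_cons.mp hf with rfl | hf
          · exact absurd h1 (lt_irrefl _)
          · rcases hvRest f hf with h | h <;> omega
      · rintro ⟨h0, hnd⟩
        refine ⟨h0, ?_⟩
        rintro y ⟨f, hf, rfl⟩
        rcases hPv f hf with h | h
        · by_contra hlt
          exact hnd f (by rw [hL]; exact List.mem_append_left _ hf) h (by omega)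
        · omega
    by_cases hcv : c ≤ pvG1 v
    · rcases hkey.mp hcv with ⟨h0, hnd⟩
      have hstep : pvLoopA wx wy ws (v :: rest) ans c =
          pvLoopA wx wy ws rest (if ws < v.sum then ans + 1 else ans) (pvG1 v) := by
        simp [pvLoopA, hnv, hcv]
      have hc' : pvG1 v = ((P ++ [v]).map pvG1).foldl max 0 := by
        rw [List.map_append, List.foldl_append]
        simp [← hc, max_eq_right hcv]
      have := ih (P ++ [v]) (if ws < v.sum then ans + 1 else ans) (pvG1 v)
        (by rw [hL, List.append_assoc]; rfl) hc'
      rw [hstep, this, List.countP_cons]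
      have hAv : pvA L ws v = decide (ws < v.sum) := by
        simp [pvA, h0, hnd]
      rw [hAv]
      by_cases hs : ws < v.sum <;> simp [hs] <;> push_cast <;> ring
    · have hstep : pvLoopA wx wy ws (v :: rest) ans c = pvLoopA wx wy ws rest ans c := by
        simp [pvLoopA, hnv, hcv]
      have hc' : c = ((P ++ [v]).map pvG1).foldl max 0 := by
        rw [List.map_append, List.foldl_append]
        simp [← hc, max_eq_left (le_of_lt (not_le.mp hcv))]
      have := ih (P ++ [v]) ans c (by rw [hL, List.append_assoc]; rfl) hc'
      rw [hstep, this, List.countP_cons]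
      have hAv : pvA L ws v = false := by
        by_cases h0 : 0 ≤ pvG1 v
        · have hnd : (L.any (fun f => decide (pvG0 v < pvG0 f) && decide (pvG1 v < pvG1 f)))
              = true := by
            by_contra hnd
            rw [Bool.not_eq_true] at hnd
            exact hcv (hkey.mpr ⟨h0, hnd⟩)
          simp [pvA, hnd]
        · simp [pvA, h0]
      simp [hAv]

-- both sides of the count: A counts (via the sorted sweep) exactly pvA, B counts pvB
lemma pvSolution_eq (scores : List (List Int)) :
    solution scores =
      (if pvBeaten scores (pvWanho scores) then -1
       else 1 + ((scores.countP
            (pvA scores (pvWanho scores).sum)) : Int)) := by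
  have hperm : (PySem.List.sorted2 scores (fun v => -(pvG0 v)) (fun v => pvG1 v)).Perm scores :=
    PySem.List.sorted2_perm scores _ _ false
  set wanho := pvWanho scores with hwan
  set L := PySem.List.sorted2 scores (fun v => -(pvG0 v)) (fun v => pvG1 v) with hLdef
  by_cases hdom : pvBeaten scores wanho = true
  · have : ∃ v ∈ L, pvG0 wanho < pvG0 v ∧ pvG1 wanho < pvG1 v := by
      simp only [pvBeaten, List.any_eq_true, Bool.and_eq_true, decide_eq_true_eq] at hdom
      rcases hdom with ⟨f, hf, h1, h2⟩
      exact ⟨f, hperm.mem_iff.mpr hf, h1, h2⟩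
    simp only [solution, hdom, if_true]
    exact pvLoop_neg _ _ _ _ _ _ this
  · rw [Bool.not_eq_true] at hdom
    have hnd : ∀ f ∈ L, ¬(pvG0 wanho < pvG0 f ∧ pvG1 wanho < pvG1 f) := by
      simp only [pvBeaten, List.any_eq_false, Bool.and_eq_true, decide_eq_true_eq,
        not_and] at hdom
      intro f hf ⟨h1, h2⟩
      exact hdom f (hperm.mem_iff.mp hf) h1 h2
    have hs := pvSweep (pvG0 wanho) (pvG1 wanho) wanho.sum L (pvSorted2_pairwise scores)
      hnd L [] 1 0 rfl rfl
    simp only [solution, hdom, if_false]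
    rw [hs]
    congr 2
    rw [hperm.countP_eq]
    apply List.countP_congr
    intro e _
    simp only [pvA]
    rw [List.Perm.any_eq hperm]

lemma pvCountP_lt {α : Type} (p q : α → Bool) :
    ∀ (l : List α), (∀ a ∈ l, p a = true → q a = true) →
      ∀ e ∈ l, q e = true → p e = false → l.countP p < l.countP q := by
  intro l
  induction l with
  | nil => intro _ e he; cases he
  | cons x t ih =>
    intro hmono e he hq hp
    have hmono' : ∀ a ∈ t, p a = true → q a = true :=
      fun a ha => hmono a (List.mem_cons_of_mem x ha)
    have hle : t.countP p ≤ t.countP q := List.countP_mono_left hmono'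
    rcases List.mem_cons.mp he with rfl | he
    · simp [List.countP_cons, hp, hq]
      omega
    · have hlt := ih hmono' e he hq hp
      simp only [List.countP_cons]
      by_cases hqx : q x = true
      · by_cases hx : p x = true
        · have hqx' := hmono x List.mem_cons_self hx
          simp [hx, hqx']
          omega
        · rw [Bool.not_eq_true] at hx
          simp [hx, hqx]
          omega
      · have hx : p x = false := by
          by_contra h
          exact hqx (hmono x (List.mem_cons_self) (by simpa using h))
        rw [Bool.not_eq_true] at hqx
        simp [hx, hqx]
        omega

-- ===== VERDICT (by name: the statement is the Claim_ definition above) =====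
theorem solution_spec : Claim_unchanged_solution := by
  intro scores _ _ hnD
  rw [pvD_iff] at hnD
  rw [pvSolution_eq, solution_alt]
  set wanho := pvWanho scores with hwan
  by_cases hdom : pvBeaten scores wanho = true
  · simp [hdom]
  · simp only [Bool.not_eq_true] at hdom
    simp only [hdom, if_false]
    have hcnt : List.countP (pvA scores wanho.sum) scores = List.countP
        (fun e => !pvBeaten scores e && decide (wanho.sum < e.sum)) scores := by
      apply List.countP_congr
      intro e hme
      have hwnd : ¬ ∃ f ∈ scores, pvG0 wanho < pvG0 f ∧ pvG1 wanho < pvG1 f := by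
        simp only [pvBeaten, List.any_eq_false, Bool.and_eq_true, decide_eq_true_eq,
          not_and] at hdom
        rintro ⟨f, hf, h1, h2⟩
        exact hdom f hf h1 h2
      have hne : ¬ ∃ e ∈ scores, pvG1 e < 0 ∧
          (¬ ∃ f ∈ scores, pvG0 e < pvG0 f ∧ pvG1 e < pvG1 f) ∧ wanho.sum < e.sum := by
        intro hx
        exact hnD ⟨hwnd, hx⟩
      simp only [pvA, pvBeaten]
      by_cases hnde :
          (scores.any fun f => decide (pvG0 e < pvG0 f) && decide (pvG1 e < pvG1 f)) = true
      · simp [hnde]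
      · rw [Bool.not_eq_true] at hnde
        by_cases hsum : wanho.sum < e.sum
        · have h0 : 0 ≤ pvG1 e := by
            by_contra h0
            refine hne ⟨e, hme, by omega, ?_, hsum⟩
            simp only [List.any_eq_false, Bool.and_eq_true, decide_eq_true_eq, not_and] at hnde
            rintro ⟨f, hf, h1, h2⟩
            exact hnde f hf h1 h2
          simp [hnde, hsum, h0]
        · simp [hnde, hsum]
    rw [hcnt]

theorem solution_changed : Claim_changed_solution := by
  unfold Claim_changed_solution; decide

theorem solution_tight : Claim_exact_solution := by
  intro scores _ _ hD
  rw [pvD_iff] at hD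
  rcases hD with ⟨hwnd, e, hme, hneg, hend, hesum⟩
  set wanho := pvWanho scores with hwan
  have hdom : pvBeaten scores wanho = false := by
    simp only [pvBeaten, List.any_eq_false, Bool.and_eq_true, decide_eq_true_eq, not_and]
    intro f hf h1 h2
    exact hwnd ⟨f, hf, h1, h2⟩
  rw [pvSolution_eq, solution_alt]
  simp only [← hwan, hdom, Bool.false_eq_true, if_false]
  have hlt : scores.countP (pvA scores wanho.sum) <
      scores.countP (fun e => !pvBeaten scores e && decide (wanho.sum < e.sum)) := by
    apply pvCountP_lt _ _ scores ?_ e hme ?_ ?_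
    · intro a _ ha
      simp only [pvA, Bool.and_eq_true, Bool.not_eq_true', decide_eq_true_eq] at ha ⊢
      exact ⟨ha.1.2, ha.2⟩
    · simp only [Bool.and_eq_true, Bool.not_eq_true', decide_eq_true_eq]
      refine ⟨?_, hesum⟩
      simp only [pvBeaten, List.any_eq_false, Bool.and_eq_true, decide_eq_true_eq, not_and]
      intro f hf h1 h2
      exact hend ⟨f, hf, h1, h2⟩
    · simp [pvA, hneg, not_le.mpr hneg]
  omega
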